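-- pv_equiv track=rewrite | github.com/MaorEl/Search_Enging_Project | Searcher.py | merge_all_terms_to_one_list
-- ===== SOURCE A (Python) =====
-- def merge_all_terms_to_one_list(query_dict, addons_dict):
--     '''
--     creates a list of merged terms
--     :param query_dict: {term : { query : tf } }
--     :param addons_dict: {term : { query : tf } }
--     :return: list of terms
--     '''
--     result = []
--     for term in query_dict:
--         if term not in result:
--             result.append(term)
--     for term in addons_dict:
--         if term not in result:
--             result.append(term)
--     return result
-- ===== SOURCE B (Python) =====
-- def merge_all_terms_to_one_list(query_dict, addons_dict):
--     '''
--     creates a list of merged terms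
--     :param query_dict: {term : { query : tf } }
--     :param addons_dict: {term : { query : tf } }
--     :return: list of terms
--     '''
--     # Selection-style dedup: repeatedly take the first remaining term and
--     # delete every later occurrence of it, instead of testing membership
--     # against the output list.
--     pending = list(query_dict) + list(addons_dict)
--     out = []
--     while pending:
--         head = pending[0]
--         out.append(head)
--         pending = [t for t in pending[1:] if t != head]
--     return out
-- ===== Notes on version B (the rewrite author's own statement) =====
-- stated objective: alternative
-- what changed: Instead of appending terms after scanning the output list for membership, B does a selection-style dedup on the concatenated key list: repeatedly emit the first remaining term and filter every later occurrence of it out of the pending list, so no membership test against the output ever happens.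
import Mathlib
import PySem

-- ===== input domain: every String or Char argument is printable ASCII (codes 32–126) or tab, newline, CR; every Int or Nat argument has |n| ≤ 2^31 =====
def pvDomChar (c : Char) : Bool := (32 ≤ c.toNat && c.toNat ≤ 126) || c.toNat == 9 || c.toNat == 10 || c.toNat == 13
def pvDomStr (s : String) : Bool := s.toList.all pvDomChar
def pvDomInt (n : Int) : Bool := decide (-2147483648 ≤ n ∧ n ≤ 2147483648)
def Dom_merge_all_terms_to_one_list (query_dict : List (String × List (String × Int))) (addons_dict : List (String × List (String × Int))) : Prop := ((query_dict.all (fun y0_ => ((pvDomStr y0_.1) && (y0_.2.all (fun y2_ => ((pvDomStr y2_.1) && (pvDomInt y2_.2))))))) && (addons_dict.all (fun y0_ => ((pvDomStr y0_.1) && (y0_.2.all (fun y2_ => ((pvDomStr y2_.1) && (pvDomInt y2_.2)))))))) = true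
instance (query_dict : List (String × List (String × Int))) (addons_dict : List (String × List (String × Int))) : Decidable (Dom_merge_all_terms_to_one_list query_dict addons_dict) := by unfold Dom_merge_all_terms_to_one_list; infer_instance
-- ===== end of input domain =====

-- B replaces A's append-if-not-in-result loops by a selection-style dedup on the
-- concatenated key list: emit the first remaining term, filter all its later
-- occurrences out of the pending list, repeat (alternative decomposition, same cost).

-- ===== PORT A =====
-- result = []; for term in query_dict: if term not in result: result.append(term); same for addons_dict
def merge_all_terms_to_one_list (query_dict : List (String × List (String × Int))) (addons_dict : List (String × List (String × Int))) : List String :=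
  let result := query_dict.foldl (fun res p => if res.contains p.1 then res else res ++ [p.1]) []
  addons_dict.foldl (fun res p => if res.contains p.1 then res else res ++ [p.1]) result

-- ===== PORT B =====
-- while pending: head = pending[0]; out.append(head); pending = [t for t in pending[1:] if t != head]
def pvSelectDedup : List String → List String
  | [] => []
  | x :: xs => x :: pvSelectDedup (xs.filter (fun t => t != x))
termination_by l => l.length
decreasing_by
  simp
  exact List.length_filter_le _ _

def merge_all_terms_to_one_list_alt (query_dict : List (String × List (String × Int))) (addons_dict : List (String × List (String × Int))) : List String :=
  pvSelectDedup (query_dict.map (·.1) ++ addons_dict.map (·.1))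

-- ===== PRECONDITION & SPEC =====
def Spec_merge_all_terms_to_one_list (query_dict : List (String × List (String × Int))) (addons_dict : List (String × List (String × Int))) (out : List String) : Prop := out = merge_all_terms_to_one_list_alt query_dict addons_dict
instance (query_dict : List (String × List (String × Int))) (addons_dict : List (String × List (String × Int))) (out : List String) : Decidable (Spec_merge_all_terms_to_one_list query_dict addons_dict out) := by unfold Spec_merge_all_terms_to_one_list; infer_instance

-- ===== CLAIM =====
def Claim_equal_merge_all_terms_to_one_list : Prop := ∀ (query_dict : List (String × List (String × Int))) (addons_dict : List (String × List (String × Int))), Dom_merge_all_terms_to_one_list query_dict addons_dict → Spec_merge_all_terms_to_one_list query_dict addons_dict (merge_all_terms_to_one_list query_dict addons_dict)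

-- ===== LEMMAS AND PROOFS =====

theorem pvSelectDedup_nil : pvSelectDedup [] = [] := by
  rw [pvSelectDedup.eq_def]

theorem pvSelectDedup_cons (x : String) (xs : List String) :
    pvSelectDedup (x :: xs) = x :: pvSelectDedup (xs.filter (fun t => t != x)) := by
  rw [pvSelectDedup.eq_def]

-- A's fold with accumulator acc equals acc followed by B's selection dedup of the
-- not-yet-seen keys.
theorem fold_eq_selectDedup (xs : List (String × List (String × Int))) : ∀ (acc : List String),
    xs.foldl (fun res p => if res.contains p.1 then res else res ++ [p.1]) acc
      = acc ++ pvSelectDedup ((xs.map (·.1)).filter (fun t => !acc.contains t)) := by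
  induction xs with
  | nil => intro acc; simp [pvSelectDedup_nil]
  | cons p xs ih =>
    intro acc
    rw [List.foldl_cons, List.map_cons, List.filter_cons]
    by_cases h : acc.contains p.1 = true
    · have hx : ¬ ((!acc.contains p.1) = true) := by rw [h]; simp
      rw [if_pos h, if_neg hx]
      exact ih acc
    · have h' : acc.contains p.1 = false := eq_false_of_ne_true h
      have hx : (!acc.contains p.1) = true := by rw [h']; rfl
      rw [if_neg h, if_pos hx, ih (acc ++ [p.1]), pvSelectDedup_cons, List.filter_filter,
        List.append_assoc, List.singleton_append]
      have hpred : ∀ t ∈ xs.map (·.1),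
          ((t != p.1) && !acc.contains t) = !(acc ++ [p.1]).contains t := by
        intro t _
        by_cases ht : t = p.1
        · subst ht; simp
        · by_cases hm : t ∈ acc <;>
            simp [List.contains_eq_mem, bne, ht, hm]
      rw [List.filter_congr hpred]

-- ===== VERDICT =====
theorem merge_all_terms_to_one_list_spec : Claim_equal_merge_all_terms_to_one_list := by
  intro q a _
  show _ = _
  simp only [merge_all_terms_to_one_list, merge_all_terms_to_one_list_alt,
    ← List.foldl_append]
  rw [fold_eq_selectDedup]
  simp
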